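-- pv_equiv track=rewrite | github.com/liyangmj23-del/nba-career-sim | events/event_chain.py | update_streak
-- ===== SOURCE A (Python) =====
-- def update_streak(state_json: dict, recent_games: list[dict]) -> int:
--     """
--     根据本周比赛结果更新连胜/连败计数。
--     正数 = 连胜，负数 = 连败。
--     """
--     streak = state_json.get("streak", 0)
--     for g in recent_games:
--         if g.get("won"):
--             streak = max(0, streak) + 1
--         else:
--             streak = min(0, streak) - 1
--     state_json["streak"] = streak
--     return streak
-- ===== SOURCE B (Python) =====
-- def _run(b, games):
--     # length of the leading run of games whose outcome equals b
--     k = 0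
--     for g in games:
--         if bool(g.get("won")) != b:
--             break
--         k += 1
--     return k
--
--
-- def _core(s0, rev_games):
--     # rev_games = recent_games newest-first; result is the signed trailing-run length
--     if not rev_games:
--         return s0
--     last = bool(rev_games[0].get("won"))
--     k = _run(last, rev_games)
--     n = len(rev_games)
--     if k == n:
--         return (max(0, s0) + k) if last else (min(0, s0) - k)
--     return k if last else -k
--
--
-- def update_streak(state_json: dict, recent_games: list[dict]) -> int:
--     streak = _core(state_json.get("streak", 0), list(reversed(recent_games)))
--     state_json["streak"] = streak
--     return streak
-- ===== Notes on version B (the rewrite author's own statement) =====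
-- stated objective: alternative
-- what changed: Replaces the per-game fold over the whole list by a backward scan that stops at the first outcome flip: the streak is the signed length of the trailing run of identical outcomes, with the carried-over streak added only when every game has the same outcome.
import Mathlib
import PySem

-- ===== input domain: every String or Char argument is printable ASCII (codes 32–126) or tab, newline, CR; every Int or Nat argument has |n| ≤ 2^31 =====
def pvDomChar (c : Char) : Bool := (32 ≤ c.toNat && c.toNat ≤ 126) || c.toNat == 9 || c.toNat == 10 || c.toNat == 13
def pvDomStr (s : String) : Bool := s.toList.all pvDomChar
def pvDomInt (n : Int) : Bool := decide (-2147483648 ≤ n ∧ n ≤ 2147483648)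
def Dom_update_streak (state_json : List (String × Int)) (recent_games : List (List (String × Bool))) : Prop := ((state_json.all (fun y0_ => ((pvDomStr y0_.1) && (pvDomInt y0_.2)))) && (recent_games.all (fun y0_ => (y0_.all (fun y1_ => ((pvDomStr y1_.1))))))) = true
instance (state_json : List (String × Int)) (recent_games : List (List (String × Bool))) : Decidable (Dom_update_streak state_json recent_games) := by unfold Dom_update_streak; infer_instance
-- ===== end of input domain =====

-- B computes the streak as the signed length of the trailing run of identical outcomes
-- (backward scan that stops at the first flip) instead of A's fold over every game.
-- Both Pythons also write the result into state_json["streak"]; the equivalence proved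
-- here is about the return value.


-- ===== PORT A =====
-- transliteration of A: initial streak from the dict, then one fold step per game
def update_streak (state_json : List (String × Int)) (recent_games : List (List (String × Bool))) : Int :=
  let streak := PySem.Dict.getD (PySem.Dict.mk state_json) "streak" 0
  let streak := recent_games.foldl
    (fun s g => if (PySem.Dict.get? (PySem.Dict.mk g) "won").getD false then max 0 s + 1 else min 0 s - 1)
    streak
  streak

-- ===== PORT B =====
-- _run in Source B: length of the leading run of games with outcome b
def pvRun (b : Bool) : List (List (String × Bool)) → Int
  | [] => 0
  | g :: t => if (PySem.Dict.get? (PySem.Dict.mk g) "won").getD false = b then 1 + pvRun b t else 0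

-- _core in Source B: works on the reversed list (newest game first)
def pvCore (s0 : Int) : List (List (String × Bool)) → Int
  | [] => s0
  | g :: t =>
    let last := (PySem.Dict.get? (PySem.Dict.mk g) "won").getD false
    let k := pvRun last (g :: t)
    if k = (t.length : Int) + 1 then
      (if last then max 0 s0 + k else min 0 s0 - k)
    else
      (if last then k else -k)

def update_streak_alt (state_json : List (String × Int)) (recent_games : List (List (String × Bool))) : Int :=
  pvCore (PySem.Dict.getD (PySem.Dict.mk state_json) "streak" 0) recent_games.reverse

-- ===== PRECONDITION & SPEC =====
def Spec_update_streak (state_json : List (String × Int)) (recent_games : List (List (String × Bool))) (out : Int) : Prop := out = update_streak_alt state_json recent_games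
instance (state_json : List (String × Int)) (recent_games : List (List (String × Bool))) (out : Int) : Decidable (Spec_update_streak state_json recent_games out) := by unfold Spec_update_streak; infer_instance

-- ===== CLAIM (what is proved, stated in full; the proofs are below) =====
def Claim_equal_update_streak : Prop := ∀ (state_json : List (String × Int)) (recent_games : List (List (String × Bool))), Dom_update_streak state_json recent_games → Spec_update_streak state_json recent_games (update_streak state_json recent_games)

-- ===== LEMMAS AND PROOFS =====

theorem pvRun_nonneg (b : Bool) (l : List (List (String × Bool))) : 0 ≤ pvRun b l := by
  induction l with
  | nil => simp [pvRun]
  | cons g t ih => simp only [pvRun]; split <;> omega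

theorem pvRun_le_length (b : Bool) (l : List (List (String × Bool))) :
    pvRun b l ≤ (l.length : Int) := by
  induction l with
  | nil => simp [pvRun]
  | cons g t ih =>
    have := pvRun_nonneg b t
    simp only [pvRun, List.length_cons]
    split <;> push_cast <;> omega

-- one fold step of A on top of pvCore equals pvCore of the extended (reversed) list
theorem pvCore_step (s0 : Int) (g : List (String × Bool)) (rl : List (List (String × Bool))) :
    (if (PySem.Dict.get? (PySem.Dict.mk g) "won").getD false then max 0 (pvCore s0 rl) + 1
     else min 0 (pvCore s0 rl) - 1) = pvCore s0 (g :: rl) := by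
  cases rl with
  | nil =>
    simp only [pvCore, pvRun, List.length_nil]
    cases hb : (PySem.Dict.get? (PySem.Dict.mk g) "won").getD false <;> simp
  | cons h t =>
    cases hb : (PySem.Dict.get? (PySem.Dict.mk g) "won").getD false <;>
    cases hh : (PySem.Dict.get? (PySem.Dict.mk h) "won").getD false <;>
    · have hle := pvRun_le_length ((PySem.Dict.get? (PySem.Dict.mk h) "won").getD false) t
      have hnn := pvRun_nonneg ((PySem.Dict.get? (PySem.Dict.mk h) "won").getD false) t
      simp only [pvCore, pvRun, hb, hh, List.length_cons, if_true, if_false,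
        Bool.false_eq_true, Bool.true_eq_false]
      rw [hh] at hle hnn
      push_cast
      simp only [max_def, min_def]
      split_ifs <;> omega

theorem foldl_eq_pvCore (s0 : Int) (rg : List (List (String × Bool))) :
    rg.foldl (fun s g => if (PySem.Dict.get? (PySem.Dict.mk g) "won").getD false then max 0 s + 1 else min 0 s - 1) s0
      = pvCore s0 rg.reverse := by
  induction rg using List.reverseRecOn with
  | nil => simp [pvCore]
  | append_singleton l g ih =>
    rw [List.foldl_append, List.foldl_cons, List.foldl_nil, ih,
      List.reverse_append]
    simpa using pvCore_step s0 g l.reverse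

-- ===== VERDICT (by name: the statement is the Claim_ definition above) =====
theorem update_streak_spec : Claim_equal_update_streak := by
  intro state_json recent_games _
  unfold Spec_update_streak update_streak update_streak_alt
  exact foldl_eq_pvCore _ _
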